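-- pv_equiv track=rewrite | github.com/kiranreddydugga/Second-year-CP | 13-isevenpositive-Python/isevenpositiveint.py | getEvenDigits
-- ===== SOURCE A (Python) =====
-- def getEvenDigits(n,i=0,x=0):
--     if(n == 0):
--         return x
--     else:
--         rem = n%10
--         if(rem % 2 == 0):
--             x += rem*(10**(i))
--             i+=1
--         return getEvenDigits(n//10,i,x)
-- ===== SOURCE B (Python) =====
-- def getEvenDigits(n, i=0, x=0):
--     # Stage 1: collect the decimal digits of n, LSB first.
--     digits = []
--     while n != 0:
--         digits.append(n % 10)
--         n //= 10
--     # Stage 2: Horner-fold the digits MSB-first, keeping only even ones.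
--     e = 0
--     for d in reversed(digits):
--         if d % 2 == 0:
--             e = e * 10 + d
--     return x + e * 10 ** i if e else x
-- ===== Notes on version B (the rewrite author's own statement) =====
-- stated objective: alternative
-- what changed: B replaces A's one-pass tail recursion carrying a position counter and an accumulator with fresh 10**i powers per even digit by two staged passes: collect the digit list, then a MSB-first Horner fold e = e*10 + d over the even digits, with one final shift by 10**i.
-- outside the precondition, e.g. on getEvenDigits(24, -1, 0): A returns 2.4, B returns 2.4000000000000004; on getEvenDigits(-3, 0, 0): A raises RecursionError, B does not finish within the time limit
import Mathlib
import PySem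

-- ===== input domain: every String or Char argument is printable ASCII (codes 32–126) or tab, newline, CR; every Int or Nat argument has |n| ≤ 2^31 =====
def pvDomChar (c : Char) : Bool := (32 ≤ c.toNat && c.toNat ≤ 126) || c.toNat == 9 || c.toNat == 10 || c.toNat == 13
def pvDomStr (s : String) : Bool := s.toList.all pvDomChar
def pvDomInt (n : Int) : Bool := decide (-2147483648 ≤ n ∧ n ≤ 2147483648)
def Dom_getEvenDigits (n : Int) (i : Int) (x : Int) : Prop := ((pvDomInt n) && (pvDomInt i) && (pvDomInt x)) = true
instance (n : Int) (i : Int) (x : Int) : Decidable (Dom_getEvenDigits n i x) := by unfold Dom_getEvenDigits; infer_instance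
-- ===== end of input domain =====

-- B replaces A's one-pass tail recursion (position counter i, accumulator x, a fresh
-- 10**i power per even digit) by two staged passes: collect the digit list, then a
-- MSB-first Horner fold over the even digits, shifted by 10**i once; objective: alternative.

-- ===== PORT A =====
-- A's recursion on n, exact for n ≥ 0 (Pre_): for n ≥ 0 Python's n%10 / n//10 are the
-- Nat % / /, so we recurse on n.toNat for termination; 10**i is 10^i.toNat (Pre_ has 0 ≤ i).
def getEvenDigitsA (n : Nat) (i : Int) (x : Int) : Int :=
  if n = 0 then x
  else
    let rem : Int := (n % 10 : Nat)
    if rem % 2 = 0 then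
      getEvenDigitsA (n / 10) (i + 1) (x + rem * 10 ^ i.toNat)
    else
      getEvenDigitsA (n / 10) i x
decreasing_by all_goals exact Nat.div_lt_self (Nat.pos_of_ne_zero (by assumption)) (by norm_num)

def getEvenDigits (n : Int) (i : Int) (x : Int) : Int := getEvenDigitsA n.toNat i x

-- ===== PORT B =====
-- B's first pass: the digit list of n, LSB first (the while loop with digits.append).
def digitsOf (m : Nat) : List Int :=
  if m = 0 then [] else ((m % 10 : Nat) : Int) :: digitsOf (m / 10)
decreasing_by exact Nat.div_lt_self (Nat.pos_of_ne_zero (by assumption)) (by norm_num)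

-- B's second pass: the for-loop over reversed(digits), Horner step on even digits.
def hornerEven (ds : List Int) : Int :=
  ds.foldl (fun e d => if d % 2 = 0 then e * 10 + d else e) 0

def getEvenDigits_alt (n : Int) (i : Int) (x : Int) : Int :=
  let e := hornerEven (digitsOf n.toNat).reverse
  if e ≠ 0 then x + e * 10 ^ i.toNat else x

-- ===== PRECONDITION & SPEC =====
-- Pre_ excludes n < 0 (A recurses forever: RecursionError; B's first loop would not
-- terminate) and i < 0 when n has an even digit (Python 10**i is then a float, so A
-- returns a float, not an int; negative i with an all-odd n stays inside Pre_,
-- both return x there).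
def Pre_getEvenDigits (n : Int) (i : Int) (x : Int) : Prop :=
  0 ≤ n ∧ (0 ≤ i ∨ (Nat.digits 10 n.toNat).all (fun d => d % 2 = 1) = true)
instance (n : Int) (i : Int) (x : Int) : Decidable (Pre_getEvenDigits n i x) := by
  unfold Pre_getEvenDigits; infer_instance

def pvWitness_getEvenDigits : Int × Int × Int := (2468, 0, 0)

def Spec_getEvenDigits (n : Int) (i : Int) (x : Int) (out : Int) : Prop := out = getEvenDigits_alt n i x
instance (n : Int) (i : Int) (x : Int) (out : Int) : Decidable (Spec_getEvenDigits n i x out) := by unfold Spec_getEvenDigits; infer_instance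

-- ===== CLAIM (what is proved, stated in full; the proofs are below) =====
def Claim_equal_getEvenDigits : Prop := ∀ (n : Int) (i : Int) (x : Int), Dom_getEvenDigits n i x → Pre_getEvenDigits n i x → Spec_getEvenDigits n i x (getEvenDigits n i x)

-- ===== LEMMAS AND PROOFS =====

theorem getEvenDigitsA_step (m : Nat) (h : m ≠ 0) (i x : Int) :
    getEvenDigitsA m i x =
      if ((m % 10 : Nat) : Int) % 2 = 0 then getEvenDigitsA (m / 10) (i + 1) (x + (m % 10 : Nat) * 10 ^ i.toNat)
      else getEvenDigitsA (m / 10) i x := by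
  rw [getEvenDigitsA]; simp [h]

-- The MSB-first Horner fold of B's reversed digit list satisfies the LSB recurrence:
-- peel the LSB digit off the end of the reversed list with foldl_append.
theorem hornerEven_rev_step (m : Nat) (h : m ≠ 0) :
    hornerEven (digitsOf m).reverse =
      if ((m % 10 : Nat) : Int) % 2 = 0 then hornerEven (digitsOf (m / 10)).reverse * 10 + (m % 10 : Nat)
      else hornerEven (digitsOf (m / 10)).reverse := by
  rw [digitsOf]
  simp only [h, if_false, List.reverse_cons]
  unfold hornerEven
  rw [List.foldl_append]
  simp only [List.foldl_cons, List.foldl_nil]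

-- A's recursion computes x + (Horner compaction of n's even digits) · 10^i.
theorem getEvenDigitsA_eq (m : Nat) :
    ∀ (i x : Int), 0 ≤ i →
      getEvenDigitsA m i x = x + hornerEven (digitsOf m).reverse * 10 ^ i.toNat := by
  induction m using Nat.strong_induction_on with
  | _ m ih =>
    intro i x hi
    by_cases h : m = 0
    · subst h; simp [getEvenDigitsA, digitsOf, hornerEven]
    · have hlt : m / 10 < m := Nat.div_lt_self (Nat.pos_of_ne_zero h) (by norm_num)
      rw [getEvenDigitsA_step m h i x, hornerEven_rev_step m h]
      by_cases hd : ((m % 10 : Nat) : Int) % 2 = 0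
      · rw [if_pos hd, if_pos hd, ih _ hlt (i + 1) _ (by omega)]
        have hpow : (i + 1).toNat = i.toNat + 1 := by omega
        rw [hpow]
        ring
      · rw [if_neg hd, if_neg hd]
        exact ih _ hlt i x hi

-- If every decimal digit of m is odd, A's recursion never touches i or x and returns x.
theorem getEvenDigitsA_odd (m : Nat) :
    ∀ (i x : Int), (Nat.digits 10 m).all (fun d => d % 2 = 1) = true → getEvenDigitsA m i x = x := by
  induction m using Nat.strong_induction_on with
  | _ m ih =>
    intro i x hodd
    by_cases h : m = 0
    · subst h; simp [getEvenDigitsA]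
    · have hlt : m / 10 < m := Nat.div_lt_self (Nat.pos_of_ne_zero h) (by norm_num)
      rw [Nat.digits_def' (by norm_num : 1 < 10) (Nat.pos_of_ne_zero h), List.all_cons] at hodd
      have h1 : m % 10 % 2 = 1 := by
        have := (Bool.and_eq_true _ _).mp hodd |>.1; simpa using this
      have h2 : ¬ ((m % 10 : Nat) : Int) % 2 = 0 := by omega
      rw [getEvenDigitsA_step m h i x, if_neg h2]
      exact ih _ hlt i x ((Bool.and_eq_true _ _).mp hodd |>.2)

-- Likewise B's Horner fold produces 0 on an all-odd m.
theorem hornerEven_odd (m : Nat) :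
    (Nat.digits 10 m).all (fun d => d % 2 = 1) = true → hornerEven (digitsOf m).reverse = 0 := by
  induction m using Nat.strong_induction_on with
  | _ m ih =>
    intro hodd
    by_cases h : m = 0
    · subst h; simp [digitsOf, hornerEven]
    · have hlt : m / 10 < m := Nat.div_lt_self (Nat.pos_of_ne_zero h) (by norm_num)
      rw [Nat.digits_def' (by norm_num : 1 < 10) (Nat.pos_of_ne_zero h), List.all_cons] at hodd
      have h1 : m % 10 % 2 = 1 := by
        have := (Bool.and_eq_true _ _).mp hodd |>.1; simpa using this
      have h2 : ¬ ((m % 10 : Nat) : Int) % 2 = 0 := by omega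
      rw [hornerEven_rev_step m h, if_neg h2]
      exact ih _ hlt ((Bool.and_eq_true _ _).mp hodd |>.2)

-- ===== VERDICT (by name: the statement is the Claim_ definition above) =====
theorem getEvenDigits_spec : Claim_equal_getEvenDigits := by
  intro n i x _ hpre
  unfold Spec_getEvenDigits getEvenDigits getEvenDigits_alt
  rcases hpre.2 with hi | hodd
  · rw [getEvenDigitsA_eq n.toNat i x hi]
    by_cases he : hornerEven (digitsOf n.toNat).reverse = 0 <;> simp [he]
  · rw [getEvenDigitsA_odd n.toNat i x hodd]
    simp [hornerEven_odd n.toNat hodd]
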